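-- pv_equiv track=rewrite | github.com/harmslab/epistasis | epistasis/mapping.py | genotype_coeffs
-- ===== SOURCE A (Python) =====
-- import itertools as it
--
-- def genotype_coeffs(genotype, order=None):
--     """List the possible epistatic coefficients (as label form) for a binary genotype
--     up to a given order.
--     """
--     if order is None:
--         order = len(genotype)
--     length = len(genotype)
--     mutations = [i + 1 for i in range(length) if genotype[i] == "1"]
--     params = [[0]]
--     for o in range(1, order+1):
--         params += [list(z) for z in it.combinations(mutations, o)]
--     return params
-- ===== SOURCE B (Python) =====
-- def _splits(xs):
--     return [(xs[i], xs[i+1:]) for i in range(len(xs))]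
--
-- def genotype_coeffs(genotype, order=None):
--     """List the possible epistatic coefficients (as label form) for a binary genotype
--     up to a given order, building each order's combinations from the previous one."""
--     if order is None:
--         order = len(genotype)
--     mutations = [i + 1 for i in range(len(genotype)) if genotype[i] == "1"]
--     params = [[0]]
--     level = [([x], rest) for x, rest in _splits(mutations)]
--     o = 1
--     while o <= order and level:
--         params += [c for c, _ in level]
--         level = [(c + [y], rest2) for c, rest in level for y, rest2 in _splits(rest)]
--         o += 1
--     return params
-- ===== Notes on version B (the rewrite author's own statement) =====
-- stated objective: faster
-- what changed: Replaces the per-order itertools.combinations calls with an inductive level construction (each order's combinations extend the previous level's by the elements remaining after their last), and the loop exits as soon as a level is empty instead of iterating all orders up to `order`.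
import Mathlib
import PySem

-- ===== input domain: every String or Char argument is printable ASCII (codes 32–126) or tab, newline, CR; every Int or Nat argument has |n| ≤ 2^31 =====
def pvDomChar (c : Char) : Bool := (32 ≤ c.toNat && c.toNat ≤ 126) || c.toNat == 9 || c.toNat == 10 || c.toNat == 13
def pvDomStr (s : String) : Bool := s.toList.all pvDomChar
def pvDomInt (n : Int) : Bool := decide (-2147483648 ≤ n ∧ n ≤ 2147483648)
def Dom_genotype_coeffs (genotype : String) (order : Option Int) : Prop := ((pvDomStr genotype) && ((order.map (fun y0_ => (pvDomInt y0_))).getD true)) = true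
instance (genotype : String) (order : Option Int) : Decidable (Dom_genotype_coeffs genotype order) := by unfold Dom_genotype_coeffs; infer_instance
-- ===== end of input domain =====

-- B builds each order's combinations by extending the previous order's level (stopping once a
-- level is empty) instead of calling itertools.combinations afresh per order; same return value.

-- ===== PORT A =====
-- mutations = [i + 1 for i in range(length) if genotype[i] == "1"]  (shared by both Pythons verbatim)
def pvMutations (genotype : String) : List Int :=
  ((PySem.List.pyRange 0 (PySem.Str.len genotype) 1).filter
    (fun i => PySem.Str.pyGet? genotype i == some '1')).map (fun i => i + 1)

-- it.combinations(ms, n), lexicographic by position (standard recursive definition)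
def pvComb : Nat → List Int → List (List Int)
  | 0, _ => [[]]
  | _ + 1, [] => []
  | n + 1, x :: xs => (pvComb n xs).map (fun c => x :: c) ++ pvComb (n + 1) xs

def genotype_coeffs (genotype : String) (order : Option Int) : List (List Int) :=
  let ord : Int := match order with
    | none => PySem.Str.len genotype
    | some o => o
  let mutations := pvMutations genotype
  (PySem.List.pyRange 1 (ord + 1) 1).foldl
    (fun params o => params ++ pvComb o.toNat mutations) [[0]]

-- ===== PORT B =====
-- _splits(xs) = [(xs[i], xs[i+1:]) for i in range(len(xs))]
def pvSplits : List Int → List (Int × List Int)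
  | [] => []
  | x :: xs => (x, xs) :: pvSplits xs

-- level = [(c + [y], rest2) for c, rest in level for y, rest2 in _splits(rest)]
def pvStep (level : List (List Int × List Int)) : List (List Int × List Int) :=
  level.flatMap (fun p => (pvSplits p.2).map (fun s => (p.1 ++ [s.1], s.2)))

-- the while loop: runs while o <= order (fuel) and level nonempty
def pvLoop : Nat → List (List Int × List Int) → List (List Int) → List (List Int)
  | 0, _, params => params
  | n + 1, level, params =>
    if level.isEmpty then params
    else pvLoop n (pvStep level) (params ++ level.map Prod.fst)

def genotype_coeffs_alt (genotype : String) (order : Option Int) : List (List Int) :=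
  let ord : Int := match order with
    | none => PySem.Str.len genotype
    | some o => o
  let mutations := pvMutations genotype
  pvLoop ord.toNat ((pvSplits mutations).map (fun s => ([s.1], s.2))) [[0]]

-- ===== PRECONDITION & SPEC =====
def Spec_genotype_coeffs (genotype : String) (order : Option Int) (out : List (List Int)) : Prop := out = genotype_coeffs_alt genotype order
instance (genotype : String) (order : Option Int) (out : List (List Int)) : Decidable (Spec_genotype_coeffs genotype order out) := by unfold Spec_genotype_coeffs; infer_instance

-- ===== CLAIM (what is proved, stated in full; the proofs are below) =====
def Claim_equal_genotype_coeffs : Prop := ∀ (genotype : String) (order : Option Int), Dom_genotype_coeffs genotype order → Spec_genotype_coeffs genotype order (genotype_coeffs genotype order)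

-- ===== LEMMAS AND PROOFS =====

theorem pvComb_succ (n : Nat) (xs : List Int) :
    pvComb (n + 1) xs = (pvSplits xs).flatMap (fun s => (pvComb n s.2).map (fun c => s.1 :: c)) := by
  induction xs with
  | nil => simp [pvComb, pvSplits]
  | cons x xs ih => simp [pvComb, pvSplits, ih]

-- what the pairs of a level denote: all order-(|fst| + k) combinations with that first part
def pvExpand (k : Nat) (P : List (List Int × List Int)) : List (List Int) :=
  P.flatMap (fun p => (pvComb k p.2).map (fun d => p.1 ++ d))

theorem pvExpand_zero (P : List (List Int × List Int)) : pvExpand 0 P = P.map Prod.fst := by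
  induction P with
  | nil => rfl
  | cons p P ih => simp [pvExpand, pvComb] at ih ⊢; exact ih

theorem pvExpand_step (k : Nat) (P : List (List Int × List Int)) :
    pvExpand (k + 1) P = pvExpand k (pvStep P) := by
  simp [pvExpand, pvStep, pvComb_succ, List.flatMap_assoc, List.map_flatMap, List.flatMap_map,
    List.map_map, Function.comp_def]

-- combinations of orders o, o+1, …, o+n-1 concatenated
def pvCombOrders : Nat → Nat → List Int → List (List Int)
  | _, 0, _ => []
  | o, n + 1, ms => pvComb o ms ++ pvCombOrders (o + 1) n ms

theorem pvCombOrders_nil (n : Nat) : ∀ (o : Nat) (ms : List Int),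
    (∀ j, pvComb (o + j) ms = []) → pvCombOrders o n ms = [] := by
  induction n with
  | zero => intro o ms _; rfl
  | succ n ih =>
    intro o ms h
    have h0 := h 0
    simp at h0
    simp [pvCombOrders, h0]
    refine ih (o + 1) ms (fun j => ?_)
    have hj := h (j + 1)
    have e : o + 1 + j = o + (j + 1) := by omega
    rw [e]; exact hj

theorem pvLoop_eq (n : Nat) : ∀ (o : Nat) (P : List (List Int × List Int))
    (params : List (List Int)) (ms : List Int),
    (∀ j, pvExpand j P = pvComb (o + j) ms) →
    pvLoop n P params = params ++ pvCombOrders o n ms := by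
  induction n with
  | zero => intro o P params ms _; simp [pvLoop, pvCombOrders]
  | succ n ih =>
    intro o P params ms h
    by_cases hP : P = []
    · subst hP
      have : ∀ j, pvComb (o + j) ms = [] := by
        intro j; rw [← h j]; rfl
      simp [pvLoop, pvCombOrders_nil (n + 1) o ms this]
    · have hne : P.isEmpty = false := by simp [hP]
      have hfst : P.map Prod.fst = pvComb o ms := by
        have := h 0; rw [pvExpand_zero] at this; simpa using this
      have hstep : ∀ j, pvExpand j (pvStep P) = pvComb (o + 1 + j) ms := by
        intro j
        rw [← pvExpand_step]
        have := h (j + 1)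
        convert this using 2
        omega
      rw [pvLoop, hne]
      simp only [Bool.false_eq_true, if_false]
      rw [ih (o + 1) (pvStep P) (params ++ P.map Prod.fst) ms hstep, hfst,
        pvCombOrders, List.append_assoc]

theorem pvAfold (ms : List Int) (n : Nat) : ∀ (a b : Int), 0 ≤ a → (b - a).toNat = n →
    ∀ (init : List (List Int)),
    (PySem.List.pyRange a b 1).foldl (fun params o => params ++ pvComb o.toNat ms) init
      = init ++ pvCombOrders a.toNat n ms := by
  induction n with
  | zero =>
    intro a b ha hn init
    rw [PySem.List.pyRange_one_eq_nil (by omega)]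
    simp [pvCombOrders]
  | succ n ih =>
    intro a b ha hn init
    rw [PySem.List.pyRange_one_cons (by omega)]
    rw [List.foldl_cons, ih (a + 1) b (by omega) (by omega)]
    have : (a + 1).toNat = a.toNat + 1 := by omega
    rw [this, pvCombOrders, List.append_assoc]

-- ===== VERDICT (by name: the statement is the Claim_ definition above) =====
theorem pvMain (ord : Int) (ms : List Int) :
    (PySem.List.pyRange 1 (ord + 1) 1).foldl
        (fun params o => params ++ pvComb o.toNat ms) [[0]]
      = pvLoop ord.toNat ((pvSplits ms).map (fun s => ([s.1], s.2))) [[0]] := by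
  have h : ∀ j, pvExpand j ((pvSplits ms).map (fun s => ([s.1], s.2))) = pvComb (1 + j) ms := by
    intro j
    rw [Nat.add_comm 1 j, pvComb_succ]
    simp [pvExpand, List.flatMap_map]
  rw [pvAfold ms ord.toNat 1 (ord + 1) (by omega) (by omega),
    pvLoop_eq ord.toNat 1 ((pvSplits ms).map (fun s => ([s.1], s.2))) [[0]] ms h]
  norm_num

theorem genotype_coeffs_spec : Claim_equal_genotype_coeffs := by
  intro genotype order _
  unfold Spec_genotype_coeffs
  cases order with
  | none => exact pvMain (PySem.Str.len genotype) (pvMutations genotype)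
  | some o => exact pvMain o (pvMutations genotype)
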